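-- pv_equiv track=rewrite | github.com/bvandenabbeele/AdventOfCode | python/day_17/main.py | x_steps_to_target
-- ===== SOURCE A (Python) =====
-- def x_steps_to_target(x0, x_target, max_steps):
--     step_options = list()
--     step = 0
--     x = 0
--     while (x <= max(x_target)) and (step <= max_steps):
--         if max(x_target) >= x >= min(x_target):
--             step_options.append(step)
--
--         x += max(0, x0 - step)
--         step += 1
--
--     return step_options
-- ===== SOURCE B (Python) =====
-- def x_steps_to_target(x0, x_target, max_steps):
--     lo_t, hi_t = min(x_target), max(x_target)
--
--     def pos(s):
--         # closed-form x-position after s steps: triangular ramp, then plateau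
--         v = min(s, x0)
--         if v <= 0:
--             return 0
--         return v * x0 - v * (v - 1) // 2
--
--     def least(lo, hi, pred):
--         # least s in [lo, hi] with pred(s); requires pred(hi)
--         while lo < hi:
--             mid = (lo + hi) // 2
--             if pred(mid):
--                 hi = mid
--             else:
--                 lo = mid + 1
--         return lo
--
--     ramp_end = max(x0, 0)
--     plateau = pos(ramp_end)
--     if plateau < lo_t:
--         return []
--     first = least(0, ramp_end, lambda s: pos(s) >= lo_t)
--     if plateau <= hi_t:
--         last = max_steps
--     else:
--         last = least(0, ramp_end, lambda s: pos(s) > hi_t) - 1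
--     last = min(last, max_steps)
--     return list(range(first, last + 1))
-- ===== Notes on version B (the rewrite author's own statement) =====
-- stated objective: alternative
-- what changed: Replaces the stateful simulation loop (running x accumulator with early break, re-evaluating max/min each iteration) by a closed-form position function (triangular ramp then plateau) filtered over range(max_steps+1).
import Mathlib
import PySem

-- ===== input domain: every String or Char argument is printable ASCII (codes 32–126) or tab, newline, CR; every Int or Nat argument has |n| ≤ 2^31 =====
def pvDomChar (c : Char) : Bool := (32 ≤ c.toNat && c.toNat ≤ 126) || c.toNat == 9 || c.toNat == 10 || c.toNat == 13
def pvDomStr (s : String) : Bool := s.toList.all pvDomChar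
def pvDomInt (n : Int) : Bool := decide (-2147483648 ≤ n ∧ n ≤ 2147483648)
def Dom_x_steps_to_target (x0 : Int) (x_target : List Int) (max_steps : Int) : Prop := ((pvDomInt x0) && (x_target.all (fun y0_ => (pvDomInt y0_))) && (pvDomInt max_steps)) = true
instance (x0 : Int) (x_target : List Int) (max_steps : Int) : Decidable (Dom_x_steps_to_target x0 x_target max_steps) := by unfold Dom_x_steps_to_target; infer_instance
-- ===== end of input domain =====

-- B replaces A's step-by-step simulation loop by a closed-form position function and a
-- binary search for the two endpoints of the (contiguous) qualifying step interval.

-- ===== PORT A =====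
-- A's while loop: state (step, x, step_options); terminates because step grows past
-- max_steps, so fuel (max_steps+1).toNat suffices.
def xLoopA (M m x0 max_steps : Int) : Nat → Int → Int → List Int → List Int
  | 0, _, _, acc => acc
  | fuel+1, step, x, acc =>
    if x ≤ M ∧ step ≤ max_steps then
      xLoopA M m x0 max_steps fuel (step + 1) (x + max 0 (x0 - step))
        (if M ≥ x ∧ x ≥ m then acc ++ [step] else acc)
    else acc

def x_steps_to_target (x0 : Int) (x_target : List Int) (max_steps : Int) : List Int :=
  match PySem.List.max? x_target (fun y => y), PySem.List.min? x_target (fun y => y) with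
  | some M, some m => xLoopA M m x0 max_steps (max_steps + 1).toNat 0 0 []
  | _, _ => []  -- unreachable: Python raises ValueError on empty x_target (excluded by Pre_)

-- ===== PORT B =====
-- closed-form x-position after s steps: triangular ramp, then plateau (Source B's pos)
def posB (x0 s : Int) : Int :=
  let v := min s x0
  if v ≤ 0 then 0 else v * x0 - PySem.Int.floordiv (v * (v - 1)) 2

-- Source B's least(lo, hi, pred): least s in [lo, hi] with pred s; requires pred hi.
-- The while loop halves the interval, so fuel (hi - lo).toNat suffices.
def bsLeast (pred : Int → Bool) : Nat → Int → Int → Int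
  | 0, lo, _ => lo
  | fuel + 1, lo, hi =>
    if lo < hi then
      if pred (PySem.Int.floordiv (lo + hi) 2) then
        bsLeast pred fuel lo (PySem.Int.floordiv (lo + hi) 2)
      else
        bsLeast pred fuel (PySem.Int.floordiv (lo + hi) 2 + 1) hi
    else lo

def x_steps_to_target_alt (x0 : Int) (x_target : List Int) (max_steps : Int) : List Int :=
  match PySem.List.min? x_target (fun y => y) with
  | none => []  -- unreachable under Pre_
  | some lo_t =>
    match PySem.List.max? x_target (fun y => y) with
    | none => []  -- unreachable under Pre_
    | some hi_t =>
      let ramp_end := max x0 0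
      let plateau := posB x0 ramp_end
      if plateau < lo_t then []
      else
        let first := bsLeast (fun s => decide (lo_t ≤ posB x0 s)) ramp_end.toNat 0 ramp_end
        let last_raw := if plateau ≤ hi_t then max_steps
                        else bsLeast (fun s => decide (hi_t < posB x0 s)) ramp_end.toNat 0 ramp_end - 1
        let last := min last_raw max_steps
        PySem.List.pyRange first (last + 1) 1

-- ===== PRECONDITION & SPEC =====
-- Pre_ excludes only the empty target list, on which Python's max()/min() raise ValueError.
def Pre_x_steps_to_target (x0 : Int) (x_target : List Int) (max_steps : Int) : Prop :=
  x_target ≠ []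
instance (x0 : Int) (x_target : List Int) (max_steps : Int) : Decidable (Pre_x_steps_to_target x0 x_target max_steps) := by unfold Pre_x_steps_to_target; infer_instance

def pvWitness_x_steps_to_target : Int × List Int × Int := (2, [1, 3], 5)

def Spec_x_steps_to_target (x0 : Int) (x_target : List Int) (max_steps : Int) (out : List Int) : Prop := out = x_steps_to_target_alt x0 x_target max_steps
instance (x0 : Int) (x_target : List Int) (max_steps : Int) (out : List Int) : Decidable (Spec_x_steps_to_target x0 x_target max_steps out) := by unfold Spec_x_steps_to_target; infer_instance

-- ===== CLAIM (what is proved, stated in full; the proofs are below) =====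
def Claim_equal_x_steps_to_target : Prop := ∀ (x0 : Int) (x_target : List Int) (max_steps : Int), Dom_x_steps_to_target x0 x_target max_steps → Pre_x_steps_to_target x0 x_target max_steps → Spec_x_steps_to_target x0 x_target max_steps (x_steps_to_target x0 x_target max_steps)

-- ===== LEMMAS AND PROOFS =====

-- the exact position A's accumulator holds after n iterations
def xA (x0 : Int) : Nat → Int
  | 0 => 0
  | n + 1 => xA x0 n + max 0 (x0 - n)

theorem posB_eq_xA (x0 : Int) : ∀ n : Nat, posB x0 (n : Int) = xA x0 n := by
  intro n
  induction n with
  | zero => simp [posB, xA]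
  | succ n ih =>
    rw [xA, ← ih]
    unfold posB
    rcases le_or_gt x0 (n : Int) with h | h
    · -- velocity already exhausted (or never positive): min is x0 in both
      have h1 : min ((n : Int) + 1) x0 = x0 := by omega
      have h2 : min (n : Int) x0 = x0 := by omega
      push_cast
      rw [h1, h2]
      have : max 0 (x0 - (n : Int)) = 0 := by omega
      omega
    · -- still ramping: min is the step count; one triangular increment
      have h1 : min ((n : Int) + 1) x0 = (n : Int) + 1 := by omega
      have h2 : min (n : Int) x0 = (n : Int) := by omega
      push_cast
      rw [h1, h2]
      have hmax : max 0 (x0 - (n : Int)) = x0 - n := by omega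
      rw [hmax]
      by_cases hn : (n : Int) ≤ 0
      · have hn0 : (n : Int) = 0 := by omega
        rw [hn0]
        simp
      · simp only [if_neg (by omega : ¬ ((n : Int) + 1 ≤ 0)), if_neg hn]
        have key : PySem.Int.floordiv (((n : Int) + 1) * ((n : Int) + 1 - 1)) 2
            = PySem.Int.floordiv ((n : Int) * ((n : Int) - 1)) 2 + n := by
          rw [PySem.Int.floordiv_eq_ediv_of_pos (by norm_num : (0:Int) < 2),
              PySem.Int.floordiv_eq_ediv_of_pos (by norm_num : (0:Int) < 2)]
          have e : ((n : Int) + 1) * ((n : Int) + 1 - 1) = (n : Int) * ((n : Int) - 1) + (n : Int) * 2 := by ring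
          rw [e, Int.add_mul_ediv_right _ _ (by norm_num : (2:Int) ≠ 0)]
        rw [key]; ring

theorem xA_mono (x0 : Int) : Monotone (xA x0) := by
  apply monotone_nat_of_le_succ
  intro n
  rw [xA]
  omega

theorem posB_mono (x0 : Int) {s t : Int} (hs : 0 ≤ s) (hst : s ≤ t) :
    posB x0 s ≤ posB x0 t := by
  have hcs : ((s.toNat : Int)) = s := by omega
  have hct : ((t.toNat : Int)) = t := by omega
  have h1 := posB_eq_xA x0 s.toNat
  have h2 := posB_eq_xA x0 t.toNat
  rw [hcs] at h1
  rw [hct] at h2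
  rw [h1, h2]
  exact xA_mono x0 (by omega : s.toNat ≤ t.toNat)

theorem posB_plateau (x0 s : Int) (h : max x0 0 ≤ s) : posB x0 s = posB x0 (max x0 0) := by
  unfold posB
  rcases le_or_gt x0 0 with h0 | h0
  · have e1 : min s x0 ≤ 0 := by omega
    have e2 : min (max x0 0) x0 ≤ 0 := by omega
    rw [if_pos e1, if_pos e2]
  · have e1 : min s x0 = x0 := by omega
    have e2 : min (max x0 0) x0 = x0 := by omega
    rw [e1, e2]

theorem posB_le_plateau (x0 s : Int) (hs : 0 ≤ s) : posB x0 s ≤ posB x0 (max x0 0) := by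
  rcases le_or_gt s (max x0 0) with h | h
  · exact posB_mono x0 hs h
  · rw [posB_plateau x0 s (le_of_lt h)]

theorem bsLeast_spec (pred : Int → Bool) :
    ∀ (fuel : Nat) (lo hi : Int), (hi - lo).toNat ≤ fuel → lo ≤ hi → pred hi = true →
    (∀ a b, lo ≤ a → a ≤ b → b ≤ hi → pred a = true → pred b = true) →
    (lo ≤ bsLeast pred fuel lo hi ∧ bsLeast pred fuel lo hi ≤ hi ∧
      pred (bsLeast pred fuel lo hi) = true ∧
      ∀ s, lo ≤ s → s < bsLeast pred fuel lo hi → pred s = false) := by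
  intro fuel
  induction fuel with
  | zero =>
    intro lo hi hn hle hhi hmono
    have heq : lo = hi := by omega
    have hb0 : bsLeast pred 0 lo hi = lo := rfl
    rw [hb0]
    exact ⟨le_refl _, hle, heq ▸ hhi, fun s hs hsr => absurd hsr (by omega)⟩
  | succ fuel ih =>
    intro lo hi hn hle hhi hmono
    rw [bsLeast]
    by_cases h : lo < hi
    · rw [if_pos h]
      have hb := PySem.Int.floordiv_two_mid_bounds hle
      have hlt : PySem.Int.floordiv (lo + hi) 2 < hi := by
        rw [PySem.Int.floordiv_lt_iff_lt_mul (by norm_num : (0:Int) < 2)]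
        omega
      by_cases hp : pred (PySem.Int.floordiv (lo + hi) 2) = true
      · rw [if_pos hp]
        have hrec := ih lo (PySem.Int.floordiv (lo + hi) 2) (by omega) (by omega) hp
          (fun a b ha hab hb' hpa => hmono a b ha hab (by omega) hpa)
        refine ⟨hrec.1, ?_, hrec.2.2.1, hrec.2.2.2⟩
        have := hrec.2.1
        omega
      · have hp' : pred (PySem.Int.floordiv (lo + hi) 2) = false := by
          simpa using hp
        rw [if_neg hp]
        have hrec := ih (PySem.Int.floordiv (lo + hi) 2 + 1) hi (by omega) (by omega) hhi
          (fun a b ha hab hb' hpa => hmono a b (by omega) hab hb' hpa)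
        refine ⟨by have := hrec.1; omega, hrec.2.1, hrec.2.2.1, ?_⟩
        intro s hs hsr
        by_cases hsm : PySem.Int.floordiv (lo + hi) 2 + 1 ≤ s
        · exact hrec.2.2.2 s hsm hsr
        · cases hps : pred s with
          | false => rfl
          | true =>
            have hcontra := hmono s (PySem.Int.floordiv (lo + hi) 2) hs (by omega) (by omega) hps
            rw [hp'] at hcontra
            exact absurd hcontra (by simp)
    · rw [if_neg h]
      have heq : lo = hi := by omega
      exact ⟨le_refl _, by omega, by rw [heq]; exact hhi,
        fun s hs hsr => absurd hsr (by omega)⟩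

theorem filter_pyRange_interval (p : Int → Bool) (lo hi : Int) :
    ∀ (n : Nat) (a b : Int), (b - a).toNat = n → hi < b →
    (∀ s, a ≤ s → s < b → (p s = true ↔ (lo ≤ s ∧ s ≤ hi))) →
    (PySem.List.pyRange a b 1).filter p = PySem.List.pyRange (max a lo) (hi + 1) 1 := by
  intro n
  induction n using Nat.strong_induction_on with
  | _ n ih =>
    intro a b hn hb hiff
    rcases le_or_gt b a with hba | hab
    · rw [PySem.List.pyRange_one_eq_nil hba, PySem.List.pyRange_one_eq_nil (by omega)]
      rfl
    · rw [PySem.List.pyRange_one_cons hab, List.filter_cons]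
      by_cases hpa : p a = true
      · have ha := (hiff a le_rfl hab).1 hpa
        rw [hpa]
        have hmax : max a lo = a := by omega
        have hrec := ih (b - (a + 1)).toNat (by omega) (a + 1) b rfl hb
          (fun s hs hsb => hiff s (by omega) hsb)
        have hm2 : max (a + 1) lo = a + 1 := by omega
        rw [hm2] at hrec
        rw [hmax, PySem.List.pyRange_one_cons (by omega : a < hi + 1)]
        simp only [if_true]
        rw [hrec]
      · have hpa' : p a = false := by simpa using hpa
        rw [hpa']
        simp only [Bool.false_eq_true, if_false]
        rcases lt_or_ge a lo with hal | hla
        · have hrec := ih (b - (a + 1)).toNat (by omega) (a + 1) b rfl hb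
            (fun s hs hsb => hiff s (by omega) hsb)
          have hm1 : max a lo = lo := by omega
          have hm2 : max (a + 1) lo = lo := by
            rcases lt_or_ge (a + 1) lo with h' | h'
            · omega
            · have : a + 1 = lo := by omega
              omega
          rw [hm2] at hrec
          rw [hm1, hrec]
        · have hha : hi < a := by
            by_contra hcon
            push_neg at hcon
            exact absurd ((hiff a le_rfl hab).2 ⟨hla, hcon⟩) (by simp [hpa'])
          rw [PySem.List.pyRange_one_eq_nil (by omega : hi + 1 ≤ max a lo)]
          apply List.filter_eq_nil_iff.2
          intro x hx
          have hmem := (PySem.List.mem_pyRange_one).1 hx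
          rw [hiff x (by omega) (by omega)]
          omega

-- A's loop equals the closed-form filter over the whole step range
theorem xLoopA_eq (M m x0 max_steps : Int) :
    ∀ (fuel : Nat) (step : Int) (acc : List Int), 0 ≤ step →
      (max_steps + 1 - step).toNat ≤ fuel →
      xLoopA M m x0 max_steps fuel step (xA x0 step.toNat) acc =
        acc ++ (PySem.List.pyRange step (max_steps + 1) 1).filter
          (fun s => decide (m ≤ posB x0 s) && decide (posB x0 s ≤ M)) := by
  intro fuel
  induction fuel with
  | zero =>
    intro step acc hstep hfuel
    have : max_steps + 1 ≤ step := by omega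
    rw [PySem.List.pyRange_one_eq_nil this]
    simp [xLoopA]
  | succ fuel ih =>
    intro step acc hstep hfuel
    have hcast : ((step.toNat : Int)) = step := by omega
    by_cases hc : xA x0 step.toNat ≤ M ∧ step ≤ max_steps
    · have hlt : step < max_steps + 1 := by omega
      rw [PySem.List.pyRange_one_cons hlt]
      have hx1 : xA x0 (step + 1).toNat = xA x0 step.toNat + max 0 (x0 - step) := by
        have : (step + 1).toNat = step.toNat + 1 := by omega
        rw [this, xA, hcast]
      have hpos : posB x0 step = xA x0 step.toNat := by
        have h := posB_eq_xA x0 step.toNat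
        rwa [hcast] at h
      rw [xLoopA, if_pos hc]
      rw [← hx1]
      rw [ih (step + 1) _ (by omega) (by omega)]
      rw [List.filter_cons]
      by_cases hp : M ≥ xA x0 step.toNat ∧ xA x0 step.toNat ≥ m
      · rw [if_pos hp]
        have : (decide (m ≤ posB x0 step) && decide (posB x0 step ≤ M)) = true := by
          rw [hpos]; simp; omega
        rw [this]
        simp
      · rw [if_neg hp]
        have : (decide (m ≤ posB x0 step) && decide (posB x0 step ≤ M)) = false := by
          rw [hpos]; simp; omega
        rw [this]
        simp
    · rw [xLoopA, if_neg hc]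
      by_cases hstop : step ≤ max_steps
      · -- broke because x exceeded M; no later step can qualify (x is monotone)
        have hxM : ¬ xA x0 step.toNat ≤ M := fun h => hc ⟨h, hstop⟩
        have : (PySem.List.pyRange step (max_steps + 1) 1).filter
            (fun s => decide (m ≤ posB x0 s) && decide (posB x0 s ≤ M)) = [] := by
          rw [List.filter_eq_nil_iff]
          intro s hs
          have hmem := (PySem.List.mem_pyRange_one).1 hs
          have hs0 : 0 ≤ s := by omega
          have hcast2 : ((s.toNat : Int)) = s := by omega
          have hposs : posB x0 s = xA x0 s.toNat := by
            have h := posB_eq_xA x0 s.toNat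
            rwa [hcast2] at h
          have hmono : xA x0 step.toNat ≤ xA x0 s.toNat :=
            xA_mono x0 (by omega : step.toNat ≤ s.toNat)
          simp [hposs]
          omega
        rw [this, List.append_nil]
      · rw [PySem.List.pyRange_one_eq_nil (by omega)]
        simp

-- the filter over the step range equals B's binary-searched interval
theorem core_eq (x0 ms m M : Int) :
    (PySem.List.pyRange 0 (ms + 1) 1).filter
      (fun s => decide (m ≤ posB x0 s) && decide (posB x0 s ≤ M)) =
    (if posB x0 (max x0 0) < m then ([] : List Int)
     else
       PySem.List.pyRange (bsLeast (fun s => decide (m ≤ posB x0 s)) (max x0 0).toNat 0 (max x0 0))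
         (min (if posB x0 (max x0 0) ≤ M then ms
               else bsLeast (fun s => decide (M < posB x0 s)) (max x0 0).toNat 0 (max x0 0) - 1) ms + 1) 1) := by
  have hramp : (0:Int) ≤ max x0 0 := by omega
  by_cases hpl : posB x0 (max x0 0) < m
  · rw [if_pos hpl]
    apply List.filter_eq_nil_iff.2
    intro s hs
    have hmem := (PySem.List.mem_pyRange_one).1 hs
    have := posB_le_plateau x0 s (by omega)
    simp
    omega
  · rw [if_neg hpl]
    have hfirst := bsLeast_spec (fun s => decide (m ≤ posB x0 s)) (max x0 0).toNat 0
      (max x0 0) (by omega) hramp (by simp; omega)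
      (fun a b ha hab hb' hpa => by
        simp at hpa ⊢
        exact le_trans hpa (posB_mono x0 ha hab))
    have hfpos : 0 ≤ bsLeast (fun s => decide (m ≤ posB x0 s)) (max x0 0).toNat 0 (max x0 0) := hfirst.1
    have hfirst_iff : ∀ s : Int, 0 ≤ s →
        (m ≤ posB x0 s ↔ bsLeast (fun s => decide (m ≤ posB x0 s)) (max x0 0).toNat 0 (max x0 0) ≤ s) := by
      intro s hs
      constructor
      · intro hm'
        by_contra hcon
        push_neg at hcon
        have := hfirst.2.2.2 s hs hcon
        simp at this
        omega
      · intro hfs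
        rcases le_or_gt s (max x0 0) with h | h
        · have hle := posB_mono x0 hfpos hfs
          have hf := hfirst.2.2.1
          simp at hf
          omega
        · rw [posB_plateau x0 s (le_of_lt h)]
          omega
    by_cases hM : posB x0 (max x0 0) ≤ M
    · rw [if_pos hM]
      have hmin : min ms ms = ms := by omega
      rw [hmin]
      have := filter_pyRange_interval
        (fun s => decide (m ≤ posB x0 s) && decide (posB x0 s ≤ M))
        (bsLeast (fun s => decide (m ≤ posB x0 s)) (max x0 0).toNat 0 (max x0 0)) ms
        ((ms + 1 - 0).toNat) 0 (ms + 1) rfl (by omega) ?_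
      · rw [this]
        congr 1
        omega
      · intro s hs hsb
        have hle := posB_le_plateau x0 s hs
        simp
        constructor
        · intro hand
          exact ⟨(hfirst_iff s hs).1 hand.1, by omega⟩
        · intro hand
          exact ⟨(hfirst_iff s hs).2 hand.1, by omega⟩
    · rw [if_neg hM]
      have hcut := bsLeast_spec (fun s => decide (M < posB x0 s)) (max x0 0).toNat 0
        (max x0 0) (by omega) hramp (by simp; omega)
        (fun a b ha hab hb' hpa => by
          simp at hpa ⊢
          exact lt_of_lt_of_le hpa (posB_mono x0 ha hab))
      have hcpos : 0 ≤ bsLeast (fun s => decide (M < posB x0 s)) (max x0 0).toNat 0 (max x0 0) := hcut.1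
      have hcut_iff : ∀ s : Int, 0 ≤ s →
          (posB x0 s ≤ M ↔ s < bsLeast (fun s => decide (M < posB x0 s)) (max x0 0).toNat 0 (max x0 0)) := by
        intro s hs
        constructor
        · intro hm'
          by_contra hcon
          push_neg at hcon
          rcases le_or_gt s (max x0 0) with h | h
          · have hle := posB_mono x0 hcpos hcon
            have hf := hcut.2.2.1
            simp at hf
            omega
          · rw [posB_plateau x0 s (le_of_lt h)] at hm'
            omega
        · intro hfs
          have := hcut.2.2.2 s hs hfs
          simp at this
          omega
      have := filter_pyRange_interval
        (fun s => decide (m ≤ posB x0 s) && decide (posB x0 s ≤ M))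
        (bsLeast (fun s => decide (m ≤ posB x0 s)) (max x0 0).toNat 0 (max x0 0))
        (min (bsLeast (fun s => decide (M < posB x0 s)) (max x0 0).toNat 0 (max x0 0) - 1) ms)
        ((ms + 1 - 0).toNat) 0 (ms + 1) rfl (by omega) ?_
      · rw [this]
        congr 1
        omega
      · intro s hs hsb
        simp
        constructor
        · intro hand
          have h1 := (hfirst_iff s hs).1 hand.1
          have h2 := (hcut_iff s hs).1 hand.2
          exact ⟨h1, by omega⟩
        · intro hand
          have h1 := (hfirst_iff s hs).2 hand.1
          have h2 := (hcut_iff s hs).2 (by omega)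
          exact ⟨h1, h2⟩

-- ===== VERDICT (by name: the statement is the Claim_ definition above) =====
theorem x_steps_to_target_spec : Claim_equal_x_steps_to_target := by
  intro x0 xt ms _ hpre
  unfold Spec_x_steps_to_target x_steps_to_target x_steps_to_target_alt
  rcases hM : PySem.List.max? xt (fun y => y) with _ | M
  · exact absurd ((PySem.List.max?_eq_none_iff _ _).1 hM) hpre
  rcases hm : PySem.List.min? xt (fun y => y) with _ | m
  · exact absurd ((PySem.List.min?_eq_none_iff _ _).1 hm) hpre
  simp only []
  have hA := xLoopA_eq M m x0 ms (ms + 1).toNat 0 [] (le_refl 0) (by omega)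
  simp only [Int.toNat_zero, xA] at hA
  rw [hA]
  simp only [List.nil_append]
  rw [core_eq x0 ms m M]
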